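-- pv_equiv track=rewrite | github.com/brbcza/advent-of-code | src/aoc/year_2024/day_12.py | _get_perimeter_points
-- ===== SOURCE A (Python) =====
-- def _get_perimeter_points(
--     cluster: set[tuple[int, int]]
-- ) -> set[tuple[int, int]]:
--     perimeter_points: set[tuple[int, int]] = set()
--     directions = [(0, 1), (1, 0), (0, -1), (-1, 0)]
--     for r, c in cluster:
--         for dx, dy in directions:
--             nr, nc = r + dx, c + dy
--             if not (nr, nc) in cluster:
--                 perimeter_points.add((r, c))
--                 break
--     return perimeter_points
-- ===== SOURCE B (Python) =====
-- def _get_perimeter_points(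
--     cluster: set[tuple[int, int]]
-- ) -> set[tuple[int, int]]:
--     # Set-algebra decomposition: the interior is the intersection of the
--     # cluster with its four shifted copies; the perimeter is everything else.
--     interior = set(cluster)
--     for dx, dy in ((0, 1), (1, 0), (0, -1), (-1, 0)):
--         interior &= {(r - dx, c - dy) for (r, c) in cluster}
--     return cluster - interior
-- ===== Notes on version B (the rewrite author's own statement) =====
-- stated objective: alternative
-- what changed: B replaces A's per-cell loop with a break over the four neighbour directions by whole-set algebra: it intersects the cluster with its four shifted copies to get the interior cells, then returns the cluster minus that interior.
import Mathlib
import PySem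

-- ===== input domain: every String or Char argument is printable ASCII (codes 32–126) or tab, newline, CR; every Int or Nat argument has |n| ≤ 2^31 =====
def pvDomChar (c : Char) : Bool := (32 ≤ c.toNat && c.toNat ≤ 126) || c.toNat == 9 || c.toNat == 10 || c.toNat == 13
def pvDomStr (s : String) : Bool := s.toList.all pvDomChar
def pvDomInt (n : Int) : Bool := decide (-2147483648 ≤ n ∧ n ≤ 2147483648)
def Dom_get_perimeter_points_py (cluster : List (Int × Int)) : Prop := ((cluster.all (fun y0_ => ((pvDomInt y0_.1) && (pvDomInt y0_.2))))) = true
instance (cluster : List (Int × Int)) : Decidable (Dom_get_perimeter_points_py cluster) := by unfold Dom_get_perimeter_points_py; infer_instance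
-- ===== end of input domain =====

-- B computes the perimeter by set algebra (cluster minus the intersection of its four
-- shifted copies) instead of A's per-cell scan over the four neighbours; objective: alternative.
-- Both programs return a set; the proved equality is about the PySem set representation.

-- ===== PORT A =====
-- the inner 'for dx, dy in directions: … break' loop of A, as structural recursion
def pvScanDirs (cluster : List (Int × Int)) (r c : Int) : List (Int × Int) → Bool
  | [] => false
  | d :: ds =>
      if cluster.contains (r + d.1, c + d.2) then pvScanDirs cluster r c ds
      else true

def get_perimeter_points_py (cluster : List (Int × Int)) : List (Int × Int) :=
  cluster.foldl
    (fun perimeter_points p =>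
      if pvScanDirs cluster p.1 p.2 [(0, 1), (1, 0), (0, -1), (-1, 0)] then
        PySem.Set.add perimeter_points p
      else perimeter_points)
    PySem.Set.empty

-- ===== PORT B =====
def get_perimeter_points_py_alt (cluster : List (Int × Int)) : List (Int × Int) :=
  let interior :=
    ([(0, 1), (1, 0), (0, -1), (-1, 0)] : List (Int × Int)).foldl
      (fun s d =>
        PySem.Set.inter s (PySem.Set.ofList (cluster.map (fun q => (q.1 - d.1, q.2 - d.2)))))
      (PySem.Set.ofList cluster)
  PySem.Set.diff (PySem.Set.ofList cluster) interior

-- ===== PRECONDITION & SPEC =====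
def Spec_get_perimeter_points_py (cluster : List (Int × Int)) (out : List (Int × Int)) : Prop := out = get_perimeter_points_py_alt cluster
instance (cluster : List (Int × Int)) (out : List (Int × Int)) : Decidable (Spec_get_perimeter_points_py cluster out) := by unfold Spec_get_perimeter_points_py; infer_instance

-- ===== CLAIM (what is proved, stated in full; the proofs are below) =====
def Claim_equal_get_perimeter_points_py : Prop := ∀ (cluster : List (Int × Int)), Dom_get_perimeter_points_py cluster → Spec_get_perimeter_points_py cluster (get_perimeter_points_py cluster)

-- ===== LEMMAS AND PROOFS =====

-- A's fold only ever adds elements that pass the test: it is ofList of a filter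
theorem pv_foldl_add_if (c : (Int × Int) → Bool) :
    ∀ (l s : List (Int × Int)),
      l.foldl (fun s p => if c p then PySem.Set.add s p else s) s
        = (l.filter c).foldl PySem.Set.add s := by
  intro l
  induction l with
  | nil => intro s; rfl
  | cons x xs ih =>
      intro s
      by_cases h : c x = true
      · simp [List.foldl_cons, h, ih]
      · simp [List.foldl_cons, h, ih]

-- dedup (= Set.ofList) commutes with filtering by a pure predicate
theorem pv_ofList_filter (c : (Int × Int) → Bool) (xs : List (Int × Int)) :
    PySem.Set.ofList (xs.filter c) = (PySem.Set.ofList xs).filter c := by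
  induction xs with
  | nil => rfl
  | cons x xs ih =>
      by_cases h : c x = true
      · simp [h, PySem.Set.ofList_cons, ih, PySem.Set.discard,
          List.filter_filter, Bool.and_comm]
      · simp only [List.filter_cons, h, if_false, Bool.false_eq_true, PySem.Set.ofList_cons,
          PySem.Set.discard, List.filter_filter, ih]
        apply List.filter_congr
        intro a _
        by_cases hax : a = x
        · subst hax; simp [Bool.eq_false_iff.2 h]
        · simp [hax]

theorem pv_mem_shift (cluster : List (Int × Int)) (p : Int × Int) (d1 d2 : Int) :
    (p ∈ cluster.map fun q => (q.1 - d1, q.2 - d2)) ↔ (p.1 + d1, p.2 + d2) ∈ cluster := by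
  rw [List.mem_map]
  constructor
  · rintro ⟨q, hq, rfl⟩
    simpa using hq
  · intro h
    exact ⟨(p.1 + d1, p.2 + d2), h, by simp⟩

-- ===== VERDICT (by name: the statement is the Claim_ definition above) =====
theorem get_perimeter_points_py_spec : Claim_equal_get_perimeter_points_py := by
  intro cluster _
  unfold Spec_get_perimeter_points_py get_perimeter_points_py get_perimeter_points_py_alt
  rw [pv_foldl_add_if]
  rw [show (cluster.filter fun p => pvScanDirs cluster p.1 p.2 [(0,1),(1,0),(0,-1),(-1,0)]).foldl
        PySem.Set.add PySem.Set.empty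
      = PySem.Set.ofList (cluster.filter fun p => pvScanDirs cluster p.1 p.2 [(0,1),(1,0),(0,-1),(-1,0)])
      from rfl]
  rw [pv_ofList_filter]
  simp only [List.foldl_cons, List.foldl_nil, PySem.Set.diff]
  apply List.filter_congr
  intro p hp
  have hpc : p ∈ cluster := (PySem.Set.mem_ofList _ _).1 hp
  rw [Bool.eq_iff_iff]
  simp only [pvScanDirs, PySem.Set.inter, PySem.Set.contains, List.contains_eq_mem,
    List.mem_filter, decide_eq_true_eq, PySem.Set.mem_ofList, pv_mem_shift, Bool.not_eq_eq_eq_not,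
    Bool.not_true, decide_eq_false_iff_not, not_and]
  by_cases h1 : (p.1, p.2 + 1) ∈ cluster <;>
  by_cases h2 : (p.1 + 1, p.2) ∈ cluster <;>
  by_cases h3 : (p.1, p.2 + -1) ∈ cluster <;>
  by_cases h4 : (p.1 + -1, p.2) ∈ cluster <;>
  simp [h1, h2, h3, h4, hpc]
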